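-- pv_equiv track=rewrite | github.com/alexander-hanel/capstool | capstool/capstool.py | _merge_constant_states
-- ===== SOURCE A (Python) =====
-- def _merge_constant_states(states):
--     """
--     Intersect predecessor constant states.
--     :param states:
--     :return:
--     """
--     states = [state for state in states if state is not None]
--     if not states:
--         return {}
--     merged = dict(states[0])
--     for key in list(merged.keys()):
--         for state in states[1:]:
--             if key not in state or state[key] != merged[key]:
--                 merged.pop(key, None)
--                 break
--     return merged
-- ===== SOURCE B (Python) =====
-- def _merge_constant_states(states):
--     """
--     Intersect predecessor constant states.
--
--     Accumulator-passing rewrite: fold each remaining state into the running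
--     intersection with a dict comprehension, instead of A's per-key scan over
--     all states with pop/break.
--     """
--     states = [state for state in states if state is not None]
--     if not states:
--         return {}
--     acc = dict(states[0])
--     for state in states[1:]:
--         acc = {k: v for k, v in acc.items() if k in state and state[k] == v}
--     return acc
-- ===== Notes on version B (the rewrite author's own statement) =====
-- stated objective: alternative
-- what changed: A scans, for every key of the first state, all remaining states with an inner break and pops failing keys; B instead folds the remaining states one at a time into an accumulated intersection rebuilt by a dict comprehension (no pop/break, no per-key outer loop).
import Mathlib
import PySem

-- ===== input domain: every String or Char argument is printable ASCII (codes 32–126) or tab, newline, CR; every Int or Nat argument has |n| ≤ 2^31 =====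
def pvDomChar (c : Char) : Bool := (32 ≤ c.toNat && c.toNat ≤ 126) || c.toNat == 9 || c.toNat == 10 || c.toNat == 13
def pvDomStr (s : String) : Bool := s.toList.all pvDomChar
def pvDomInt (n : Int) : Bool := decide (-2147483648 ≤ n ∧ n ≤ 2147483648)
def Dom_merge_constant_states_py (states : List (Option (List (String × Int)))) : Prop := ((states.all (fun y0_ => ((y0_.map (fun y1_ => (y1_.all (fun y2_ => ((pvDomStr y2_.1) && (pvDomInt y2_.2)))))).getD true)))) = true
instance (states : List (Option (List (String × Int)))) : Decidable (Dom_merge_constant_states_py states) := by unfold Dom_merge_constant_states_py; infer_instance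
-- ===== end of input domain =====

-- B replaces A's per-key scan over all states (with pop/break) by an accumulator fold
-- that filters the running intersection against one state at a time; same cost, different decomposition.

-- ===== PORT A =====
-- per-key condition: 'key not in state or state[key] != merged[key]'
def pvCondA (rest : List (List (String × Int))) (key : String) (ov : Option Int) : Bool :=
  rest.any (fun st =>
    let d := PySem.Dict.ofList st
    !(d.contains key) || (d.get? key != ov))

def merge_constant_states_py (states : List (Option (List (String × Int)))) : List (String × Int) :=
  let sts := states.filterMap id
  match sts with
  | [] => []
  | s0 :: rest =>
    let merged := PySem.Dict.ofList s0
    -- 'for key in list(merged.keys()): for state in states[1:]: if …: merged.pop(key, None); break'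
    let final := merged.keys.foldl
      (fun (m : PySem.Dict String Int) key =>
        if pvCondA rest key (m.get? key) then m.erase key else m) merged
    final.items

-- ===== PORT B =====
def merge_constant_states_py_alt (states : List (Option (List (String × Int)))) : List (String × Int) :=
  let sts := states.filterMap id
  match sts with
  | [] => []
  | s0 :: rest =>
    -- 'acc = dict(states[0]); for state in rest: acc = {k: v for k, v in acc.items() if k in state and state[k] == v}'
    (rest.foldl
      (fun (acc : PySem.Dict String Int) st =>
        let d := PySem.Dict.ofList st
        PySem.Dict.mk (acc.items.filter (fun p => d.contains p.1 && (d.get? p.1 == some p.2))))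
      (PySem.Dict.ofList s0)).items

-- ===== PRECONDITION & SPEC =====
def Spec_merge_constant_states_py (states : List (Option (List (String × Int)))) (out : List (String × Int)) : Prop := out = merge_constant_states_py_alt states
instance (states : List (Option (List (String × Int)))) (out : List (String × Int)) : Decidable (Spec_merge_constant_states_py states out) := by unfold Spec_merge_constant_states_py; infer_instance

-- ===== CLAIM (what is proved, stated in full; the proofs are below) =====
def Claim_equal_merge_constant_states_py : Prop := ∀ (states : List (Option (List (String × Int)))), Dom_merge_constant_states_py states → Spec_merge_constant_states_py states (merge_constant_states_py states)

-- ===== LEMMAS AND PROOFS =====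

-- find? over a filter that only removes key k does not change lookup at x ≠ k
theorem pv_find?_filter_ne (l : List (String × Int)) (k x : String) (h : x ≠ k) :
    (l.filter (fun p => !(p.1 == k))).find? (fun p => p.1 == x) = l.find? (fun p => p.1 == x) := by
  induction l with
  | nil => rfl
  | cons q l ih =>
    by_cases hk : q.1 = k
    · have hqx : q.1 ≠ x := by rw [hk]; exact fun hh => h hh.symm
      rw [List.filter_cons_of_neg (by simp [hk]), List.find?_cons_of_neg (by simp [hqx]), ih]
    · rw [List.filter_cons_of_pos (by simp [hk])]
      by_cases hx : q.1 = x
      · rw [List.find?_cons_of_pos (by simp [hx]), List.find?_cons_of_pos (by simp [hx])]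
      · rw [List.find?_cons_of_neg (by simp [hx]), List.find?_cons_of_neg (by simp [hx]), ih]

theorem pv_get?_erase_ne (m : PySem.Dict String Int) (k x : String) (h : x ≠ k) :
    (m.erase k).get? x = m.get? x := by
  simp [PySem.Dict.erase, PySem.Dict.get?, pv_find?_filter_ne m.items k x h]

-- A's key loop, characterised as one filter over the starting items
theorem pv_foldA (rest : List (List (String × Int))) :
    ∀ (ks : List String) (m : PySem.Dict String Int), ks.Nodup →
    (ks.foldl (fun (m : PySem.Dict String Int) key =>
        if pvCondA rest key (m.get? key) then m.erase key else m) m).items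
      = m.items.filter (fun p => !decide (p.1 ∈ ks) || !pvCondA rest p.1 (m.get? p.1)) := by
  intro ks
  induction ks with
  | nil => intro m _; simp
  | cons k ks ih =>
    intro m hnd
    have hnd' : ks.Nodup := hnd.of_cons
    have hknot : k ∉ ks := by simp [List.nodup_cons] at hnd; exact hnd.1
    by_cases hC : pvCondA rest k (m.get? k) = true
    · rw [List.foldl_cons, if_pos hC, ih (m.erase k) hnd']
      have hitems : (m.erase k).items = m.items.filter (fun p => !(p.1 == k)) := rfl
      rw [hitems, List.filter_filter]
      apply List.filter_congr
      intro p _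
      by_cases hpk : p.1 = k
      · simp [hpk, hC]
      · simp [hpk, pv_get?_erase_ne m k p.1 hpk]
    · rw [List.foldl_cons, if_neg hC, ih m hnd']
      apply List.filter_congr
      intro p _
      by_cases hpk : p.1 = k
      · simp [hpk, hC]
      · simp [hpk]

-- B's state loop, characterised as one filter over the starting items
theorem pv_foldB (rest : List (List (String × Int))) :
    ∀ (d : PySem.Dict String Int),
    (rest.foldl (fun (acc : PySem.Dict String Int) st =>
        let D := PySem.Dict.ofList st
        PySem.Dict.mk (acc.items.filter (fun p => D.contains p.1 && (D.get? p.1 == some p.2)))) d).items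
      = d.items.filter (fun p => rest.all (fun st =>
          (PySem.Dict.ofList st).contains p.1 && ((PySem.Dict.ofList st).get? p.1 == some p.2))) := by
  induction rest with
  | nil => intro d; simp
  | cons st rest ih =>
    intro d
    rw [List.foldl_cons, ih, PySem.Dict.items, List.filter_filter]
    apply List.filter_congr
    intro p _
    simp [Bool.and_comm]

theorem merge_constant_states_py_spec : Claim_equal_merge_constant_states_py := by
  intro states _
  unfold Spec_merge_constant_states_py merge_constant_states_py merge_constant_states_py_alt
  cases h : states.filterMap id with
  | nil => rfl
  | cons s0 rest =>
    simp only []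
    rw [pv_foldB, pv_foldA rest (PySem.Dict.ofList s0).keys (PySem.Dict.ofList s0)
      (PySem.Dict.nodup_keys_ofList s0)]
    apply List.filter_congr
    intro p hp
    have hkey : p.1 ∈ (PySem.Dict.ofList s0).keys := PySem.Dict.mem_keys_of_mem_items _ hp
    have hget : (PySem.Dict.ofList s0).get? p.1 = some p.2 :=
      PySem.Dict.get?_of_mem_items _ hp (PySem.Dict.nodup_keys_ofList s0)
    rw [hget]
    simp [hkey, pvCondA, List.all_eq_not_any_not, bne]
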